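-- pv_equiv track=rewrite | github.com/JonSteinn/Kattis-Solutions | src/Tired Terry/Python 3/main.py | can_wake
-- ===== SOURCE A (Python) =====
-- from itertools import islice
--
-- def can_wake(p,d,pattern):
--     sleeps = 0
--     for x in islice(pattern,0,p):
--         if x == 'Z':
--             sleeps += 1
--     not_tired = 1 if sleeps >= d else 0
--     for i,x in enumerate(islice(pattern,p,None)):
--         if pattern[i] == 'Z':
--             sleeps -= 1
--         if x == 'Z':
--             sleeps += 1
--         if sleeps >= d:
--             not_tired +=1
--     return not_tired
-- ===== SOURCE B (Python) =====
-- def can_wake(p, d, pattern):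
--     n = len(pattern)
--     prefix = [0] * (n + 1)
--     for i, c in enumerate(pattern):
--         prefix[i + 1] = prefix[i] + (c == 'Z')
--     return sum(1 for j in range(max(1, n - p + 1))
--                if prefix[min(j + p, n)] - prefix[j] >= d)
-- ===== Notes on version B (the rewrite author's own statement) =====
-- stated objective: alternative
-- what changed: Replaced the stateful sliding-window loop (maintaining a running sleep count with paired add/subtract updates) by a prefix-sum array plus a direct count over window start indices, with the short-pattern single-window case folded into the max/min bounds.
import Mathlib
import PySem

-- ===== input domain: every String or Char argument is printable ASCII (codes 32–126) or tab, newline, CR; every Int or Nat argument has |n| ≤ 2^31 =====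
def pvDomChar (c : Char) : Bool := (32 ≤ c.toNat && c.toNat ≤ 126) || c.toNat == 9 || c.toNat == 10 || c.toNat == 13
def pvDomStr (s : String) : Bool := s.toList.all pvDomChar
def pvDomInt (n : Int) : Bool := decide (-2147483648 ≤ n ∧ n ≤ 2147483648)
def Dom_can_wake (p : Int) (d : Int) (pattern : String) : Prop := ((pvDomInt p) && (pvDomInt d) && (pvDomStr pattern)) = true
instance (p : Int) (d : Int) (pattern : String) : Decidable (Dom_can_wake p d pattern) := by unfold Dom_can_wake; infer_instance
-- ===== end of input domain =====

-- B replaces A's stateful sliding-window loop by a prefix-sum array and a direct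
-- count over window start indices (alternative decomposition, same O(n) cost).
-- Pre_ excludes p < 0, on which A raises ValueError (islice rejects negative bounds).


-- ===== PORT A =====
-- second loop of A: index i, current sleeps, accumulator not_tired
def canWakeLoopA (cs : List Char) (d : Int) : List Char → Nat → Int → Int → Int
  | [], _, _, nt => nt
  | x :: rest, i, sleeps, nt =>
    let s1 := if cs.getD i ' ' == 'Z' then sleeps - 1 else sleeps
    let s2 := if x == 'Z' then s1 + 1 else s1
    let nt' := if s2 ≥ d then nt + 1 else nt
    canWakeLoopA cs d rest (i + 1) s2 nt'

def can_wake (p : Int) (d : Int) (pattern : String) : Int :=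
  let cs := pattern.toList
  -- islice(pattern, 0, p): the first p characters (p ≥ 0 under Pre_)
  let sleeps := (cs.take p.toNat).foldl (fun s x => if x == 'Z' then s + 1 else s) (0 : Int)
  let not_tired : Int := if sleeps ≥ d then 1 else 0
  canWakeLoopA cs d (cs.drop p.toNat) 0 sleeps not_tired

-- ===== PORT B =====
def can_wake_alt (p : Int) (d : Int) (pattern : String) : Int :=
  let cs := pattern.toList
  let n := cs.length
  let pref := List.scanl (fun s c => s + (if c == 'Z' then (1 : Int) else 0)) 0 cs
  ((List.range (max 1 (n - p.toNat + 1))).filter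
    (fun j => pref.getD (min (j + p.toNat) n) 0 - pref.getD j 0 ≥ d)).length

-- ===== PRECONDITION & SPEC =====
-- Pre_ excludes exactly p < 0, where Python A raises ValueError (islice rejects negative bounds).
def Pre_can_wake (p : Int) (d : Int) (pattern : String) : Prop := 0 ≤ p
instance (p : Int) (d : Int) (pattern : String) : Decidable (Pre_can_wake p d pattern) := by unfold Pre_can_wake; infer_instance
def pvWitness_can_wake : Int × Int × String := (2, 1, "ZAZZ")

def Spec_can_wake (p : Int) (d : Int) (pattern : String) (out : Int) : Prop := out = can_wake_alt p d pattern
instance (p : Int) (d : Int) (pattern : String) (out : Int) : Decidable (Spec_can_wake p d pattern out) := by unfold Spec_can_wake; infer_instance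

-- ===== CLAIM (what is proved, stated in full; the proofs are below) =====
def Claim_equal_can_wake : Prop := ∀ (p : Int) (d : Int) (pattern : String), Dom_can_wake p d pattern → Pre_can_wake p d pattern → Spec_can_wake p d pattern (can_wake p d pattern)

-- ===== LEMMAS AND PROOFS =====

-- number of 'Z' characters, as an Int
def Zc (l : List Char) : Int := (l.filter (· == 'Z')).length

theorem Zc_nil : Zc [] = 0 := rfl

theorem Zc_cons (x : Char) (l : List Char) :
    Zc (x :: l) = (if x == 'Z' then 1 else 0) + Zc l := by
  by_cases h : x == 'Z' <;> simp [Zc, h] <;> ring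

theorem Zc_append (a b : List Char) : Zc (a ++ b) = Zc a + Zc b := by
  simp [Zc]

theorem foldl_Zc (l : List Char) (a : Int) :
    l.foldl (fun s x => if x == 'Z' then s + 1 else s) a = a + Zc l := by
  induction l generalizing a with
  | nil => simp [Zc_nil]
  | cons x t ih =>
    rw [List.foldl_cons, Zc_cons, ih]
    split_ifs <;> ring

theorem scanl_getD (l : List Char) (a : Int) (j : Nat) (hj : j ≤ l.length) :
    (List.scanl (fun s c => s + (if c == 'Z' then (1 : Int) else 0)) a l).getD j 0
      = a + Zc (l.take j) := by
  induction l generalizing a j with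
  | nil =>
    have hj0 : j = 0 := by simpa using hj
    subst hj0
    simp [Zc_nil]
  | cons x t ih =>
    rw [List.scanl_cons]
    cases j with
    | zero => simp [Zc_nil]
    | succ k =>
      simp only [List.getD_cons_succ, List.take_succ_cons, Zc_cons]
      rw [ih _ k (by simpa using hj)]
      by_cases h : x == 'Z' <;> simp only [h, if_true] <;> ring

theorem drop_head (cs : List Char) (k : Nat) (hk : k < cs.length) :
    cs.drop k = cs.getD k ' ' :: cs.drop (k + 1) := by
  rw [List.drop_eq_getElem_cons hk, List.getD_eq_getElem cs ' ' hk]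

-- window content: taking one element at k < length
theorem take_one_drop (cs : List Char) (k : Nat) (hk : k < cs.length) :
    (cs.drop k).take 1 = [cs.getD k ' '] := by
  rw [drop_head cs k hk]
  simp

-- the sliding-window step
theorem Zc_slide (cs : List Char) (w i : Nat) (h : w + i < cs.length) :
    Zc ((cs.drop (i + 1)).take w)
      = Zc ((cs.drop i).take w)
        - (if cs.getD i ' ' == 'Z' then 1 else 0)
        + (if cs.getD (w + i) ' ' == 'Z' then 1 else 0) := by
  have hi : i < cs.length := by omega
  have e1 : (cs.drop i).take (1 + w) = (cs.drop i).take 1 ++ ((cs.drop i).drop 1).take w :=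
    List.take_add
  have e2 : (cs.drop i).take (w + 1) = (cs.drop i).take w ++ ((cs.drop i).drop w).take 1 :=
    List.take_add
  rw [take_one_drop cs i hi] at e1
  have hd1 : (cs.drop i).drop 1 = cs.drop (i + 1) := by rw [List.drop_drop]
  have hdw : (cs.drop i).drop w = cs.drop (w + i) := by rw [List.drop_drop, Nat.add_comm]
  rw [hd1] at e1
  rw [hdw, take_one_drop cs (w + i) h] at e2
  have : Zc ((cs.drop i).take (1 + w)) = Zc ((cs.drop i).take (w + 1)) := by
    rw [Nat.add_comm]
  rw [e1, e2] at this
  simp only [Zc_append, Zc_cons, Zc_nil] at this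
  by_cases h1 : cs.getD i ' ' == 'Z' <;> by_cases h2 : cs.getD (w + i) ' ' == 'Z' <;>
    simp only [h1, h2, if_true] at this ⊢ <;> omega

-- the main invariant of A's second loop (for w ≤ n)
theorem loopA_spec (cs : List Char) (d : Int) (w : Nat) (hw : w ≤ cs.length) :
    ∀ (m i : Nat) (nt : Int), w + i + m = cs.length →
    canWakeLoopA cs d (cs.drop (w + i)) i (Zc ((cs.drop i).take w)) nt
      = nt + ((List.range' (i + 1) m).filter
          (fun j => Zc ((cs.drop j).take w) ≥ d)).length := by
  intro m
  induction m with
  | zero =>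
    intro i nt h
    have : cs.drop (w + i) = [] := by
      rw [List.drop_eq_nil_iff]; omega
    rw [this]
    simp [canWakeLoopA]
  | succ m ih =>
    intro i nt h
    have hlt : w + i < cs.length := by omega
    rw [drop_head cs (w + i) hlt]
    simp only [canWakeLoopA]
    have hs : (if cs.getD (w + i) ' ' == 'Z' then
          (if cs.getD i ' ' == 'Z' then Zc ((cs.drop i).take w) - 1 else Zc ((cs.drop i).take w)) + 1
        else
          (if cs.getD i ' ' == 'Z' then Zc ((cs.drop i).take w) - 1 else Zc ((cs.drop i).take w)))
        = Zc ((cs.drop (i + 1)).take w) := by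
      rw [Zc_slide cs w i hlt]
      split_ifs <;> omega
    rw [hs]
    have harg : w + i + 1 = w + (i + 1) := by omega
    rw [harg]
    rw [ih (i + 1) _ (by omega)]
    rw [List.range'_succ]
    rw [List.filter_cons]
    by_cases hd : Zc ((cs.drop (i + 1)).take w) ≥ d <;> simp [hd] <;> omega

-- B's predicate equals the window predicate (for j in range)
theorem b_pred (cs : List Char) (d : Int) (w j : Nat) (hj : j ≤ cs.length) :
    ((List.scanl (fun s c => s + (if c == 'Z' then (1 : Int) else 0)) 0 cs).getD
        (min (j + w) cs.length) 0
      - (List.scanl (fun s c => s + (if c == 'Z' then (1 : Int) else 0)) 0 cs).getD j 0 ≥ d)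
      ↔ (Zc ((cs.drop j).take w) ≥ d) := by
  rw [scanl_getD cs 0 (min (j + w) cs.length) (by omega),
      scanl_getD cs 0 j hj]
  have htk : cs.take (min (j + w) cs.length) = cs.take (j + w) := by
    rcases Nat.le_total (j + w) cs.length with h | h
    · rw [Nat.min_eq_left h]
    · rw [Nat.min_eq_right h, List.take_length, List.take_of_length_le h]
  rw [htk, List.take_add, Zc_append]
  constructor <;> intro <;> omega

theorem filter_length_range' (P : Nat → Prop) [DecidablePred P] (k m : Nat) :
    ((List.range' k (m + 1)).filter (fun j => decide (P j))).length
      = (if P k then 1 else 0) + ((List.range' (k + 1) m).filter (fun j => decide (P j))).length := by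
  rw [List.range'_succ, List.filter_cons]
  by_cases h : P k <;> simp [h] <;> omega

-- ===== VERDICT (by name: the statement is the Claim_ definition above) =====
theorem can_wake_spec : Claim_equal_can_wake := by
  intro p d pattern _ hp
  unfold Spec_can_wake can_wake can_wake_alt
  set cs := pattern.toList with hcs
  set w := p.toNat with hwdef
  set n := cs.length with hn
  simp only []
  rw [foldl_Zc]
  simp only [zero_add]
  have hfilter : ∀ (k m : Nat), k + m ≤ n + 1 →
      ((List.range' k m).filter
          (fun j => (List.scanl (fun s c => s + (if c == 'Z' then (1 : Int) else 0)) 0 cs).getD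
              (min (j + w) n) 0
            - (List.scanl (fun s c => s + (if c == 'Z' then (1 : Int) else 0)) 0 cs).getD j 0 ≥ d)).length
        = ((List.range' k m).filter (fun j => Zc ((cs.drop j).take w) ≥ d)).length
      := by
    intro k m hkm
    apply congrArg
    apply List.filter_congr
    intro j hj
    have hjn : j ≤ n := by
      have := List.mem_range'_1.mp hj
      omega
    simp only [decide_eq_decide]
    exact b_pred cs d w j hjn
  by_cases hwn : w ≤ n
  · -- normal case: windows j = 0 .. n - w
    have hmax : max 1 (n - w + 1) = n - w + 1 := by omega
    rw [hmax]
    rw [List.range_eq_range'] -- range m = range' 0 m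
    rw [hfilter 0 (n - w + 1) (by omega)]
    have hloop := loopA_spec cs d w hwn (n - w) 0
      (if Zc (cs.take w) ≥ d then 1 else 0) (by omega)
    simp only [Nat.add_zero, List.drop_zero, zero_add] at hloop
    rw [hloop]
    rw [filter_length_range' (fun j => Zc ((cs.drop j).take w) ≥ d) 0 (n - w)]
    simp only [List.drop_zero, zero_add]
    by_cases hd : Zc (cs.take w) ≥ d <;> simp [hd]
  · -- short-string case: one clamped window over the whole string
    have hmax : max 1 (n - w + 1) = 1 := by omega
    rw [hmax]
    have hdropw : cs.drop w = [] := by rw [List.drop_eq_nil_iff]; omega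
    rw [hdropw]
    simp only [canWakeLoopA]
    have htakew : cs.take w = cs := List.take_of_length_le (by omega)
    rw [htakew]
    have hr1 : (List.range 1) = [0] := rfl
    rw [hr1, List.filter_cons, List.filter_nil]
    have hmin : min (0 + w) n = n := by omega
    have hg1 := scanl_getD cs 0 n (le_refl n)
    have hg0 := scanl_getD cs 0 0 (by omega)
    simp only [List.take_zero, Zc_nil] at hg0
    have htn : cs.take n = cs := by rw [hn, List.take_length]
    rw [htn] at hg1
    rw [hmin, hg1, hg0]
    by_cases hd : Zc cs ≥ d <;> simp [hd]
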